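-- pv_equiv track=rewrite | github.com/m1nnh/Problem-Solving | Programmers/부족한 금액 계산하기.py | solution
-- ===== SOURCE A (Python) =====
-- def solution(price, money, count):
--     answer = 0
--     original_price = price
--
--     for i in range(count):
--         money -= price
--         price += original_price
--
--     if money < 0:
--         answer = money * (-1)
--
--     return answer
-- ===== SOURCE B (Python) =====
-- def solution(price, money, count):
--     n = count if count > 0 else 0
--     return max(0, price * n * (n + 1) // 2 - money)
-- ===== Notes on version B (the rewrite author's own statement) =====
-- stated objective: faster
-- what changed: Replaced the O(count) accumulation loop by the closed-form Gauss sum price*count*(count+1)//2 and a max with 0.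
import Mathlib
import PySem

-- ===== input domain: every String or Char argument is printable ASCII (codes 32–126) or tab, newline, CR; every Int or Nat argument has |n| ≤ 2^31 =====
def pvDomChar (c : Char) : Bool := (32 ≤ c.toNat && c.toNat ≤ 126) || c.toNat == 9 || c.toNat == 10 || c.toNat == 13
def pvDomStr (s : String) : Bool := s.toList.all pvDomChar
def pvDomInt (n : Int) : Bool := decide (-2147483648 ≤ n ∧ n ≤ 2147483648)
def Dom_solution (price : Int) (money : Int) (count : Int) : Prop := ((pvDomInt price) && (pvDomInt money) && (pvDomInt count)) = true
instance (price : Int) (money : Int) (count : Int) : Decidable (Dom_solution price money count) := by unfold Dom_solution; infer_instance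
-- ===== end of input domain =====

-- B replaces A's O(count) subtraction loop by the closed-form Gauss sum price*count*(count+1)//2 (faster, O(1)).

-- ===== PORT A =====
-- loop state: (money, price); original_price stays fixed
def solution (price : Int) (money : Int) (count : Int) : Int :=
  let answer : Int := 0
  let original_price := price
  let st := (PySem.List.pyRange 0 count 1).foldl
    (fun (st : Int × Int) _ => (st.1 - st.2, st.2 + original_price)) (money, price)
  let money := st.1
  let answer := if money < 0 then money * (-1) else answer
  answer

-- ===== PORT B =====
def solution_alt (price : Int) (money : Int) (count : Int) : Int :=
  let n : Int := if count > 0 then count else 0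
  max 0 (PySem.Int.floordiv (price * n * (n + 1)) 2 - money)

-- ===== PRECONDITION & SPEC =====
def Spec_solution (price : Int) (money : Int) (count : Int) (out : Int) : Prop := out = solution_alt price money count
instance (price : Int) (money : Int) (count : Int) (out : Int) : Decidable (Spec_solution price money count out) := by unfold Spec_solution; infer_instance

-- ===== CLAIM (what is proved, stated in full; the proofs are below) =====
def Claim_equal_solution : Prop := ∀ (price : Int) (money : Int) (count : Int), Dom_solution price money count → Spec_solution price money count (solution price money count)

-- ===== LEMMAS AND PROOFS =====

-- triangular numbers, recursively
def pvTri : Nat → Int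
  | 0 => 0
  | Nat.succ k => pvTri k + (k + 1)

theorem pvTri_two_mul (k : Nat) : 2 * pvTri k = (k : Int) * (k + 1) := by
  induction k with
  | zero => simp [pvTri]
  | succ k ih =>
    simp only [pvTri]
    push_cast
    linarith

theorem pv_loop_eq (p0 : Int) (k : Nat) (m : Int) :
    (PySem.List.pyRange 0 (k : Int) 1).foldl
      (fun (st : Int × Int) _ => (st.1 - st.2, st.2 + p0)) (m, p0)
    = (m - p0 * pvTri k, p0 * ((k : Int) + 1)) := by
  induction k with
  | zero => simp [PySem.List.pyRange_one_eq_nil, pvTri]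
  | succ k ih =>
    have h : PySem.List.pyRange 0 ((k : Int) + 1) 1
        = PySem.List.pyRange 0 (k : Int) 1 ++ [(k : Int)] := by
      exact PySem.List.pyRange_one_succ_right (by positivity)
    push_cast
    rw [h, List.foldl_append, ih]
    simp [pvTri]
    constructor <;> ring

theorem pv_floordiv_two_mul (a : Int) : PySem.Int.floordiv (2 * a) 2 = a := by
  rw [PySem.Int.floordiv_eq_ediv_of_pos (by norm_num)]
  exact Int.mul_ediv_cancel_left a (by norm_num)

-- ===== VERDICT (by name: the statement is the Claim_ definition above) =====
theorem solution_spec : Claim_equal_solution := by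
  intro price money count _
  unfold Spec_solution solution solution_alt
  by_cases hc : count > 0
  · have hk : count = ((count.toNat : Nat) : Int) := by omega
    simp only [if_pos hc]
    rw [hk, pv_loop_eq price count.toNat money]
    have h2 : price * ((count.toNat : Nat) : Int) * (((count.toNat : Nat) : Int) + 1)
        = 2 * (price * pvTri count.toNat) := by
      rw [mul_assoc, ← pvTri_two_mul]; ring
    rw [h2, pv_floordiv_two_mul]
    simp only []
    omega
  · have h : PySem.List.pyRange 0 count 1 = [] :=
      PySem.List.pyRange_one_eq_nil (by omega)
    simp only [if_neg hc, h, List.foldl_nil]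
    have : PySem.Int.floordiv (price * 0 * (0 + 1)) 2 = 0 := by
      norm_num [PySem.Int.floordiv_eq_ediv_of_pos]
    rw [this]
    omega
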